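-- pv_equiv track=rewrite | github.com/code-study-classes/python-basics-mariiia8 | practice_package/strings.py | encrypt_sentence
-- ===== SOURCE A (Python) =====
-- def encrypt_sentence(sentence):
--     even_chars = []
--     odd_chars = []
--     for i, char in enumerate(sentence):
--         if i % 2 == 1:
--             even_chars.append(char)
--         else:
--             odd_chars.append(char)
--     return ''.join(even_chars) + ''.join(reversed(odd_chars))
-- ===== SOURCE B (Python) =====
-- def encrypt_sentence(sentence):
--     return sentence[1::2] + sentence[0::2][::-1]
-- ===== Notes on version B (the rewrite author's own statement) =====
-- stated objective: idiomatic
-- what changed: Replaces the enumerate loop with its parity branch and two accumulator lists by two extended slices: the odd-index characters in order plus the even-index characters reversed via [::-1].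
import Mathlib
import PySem

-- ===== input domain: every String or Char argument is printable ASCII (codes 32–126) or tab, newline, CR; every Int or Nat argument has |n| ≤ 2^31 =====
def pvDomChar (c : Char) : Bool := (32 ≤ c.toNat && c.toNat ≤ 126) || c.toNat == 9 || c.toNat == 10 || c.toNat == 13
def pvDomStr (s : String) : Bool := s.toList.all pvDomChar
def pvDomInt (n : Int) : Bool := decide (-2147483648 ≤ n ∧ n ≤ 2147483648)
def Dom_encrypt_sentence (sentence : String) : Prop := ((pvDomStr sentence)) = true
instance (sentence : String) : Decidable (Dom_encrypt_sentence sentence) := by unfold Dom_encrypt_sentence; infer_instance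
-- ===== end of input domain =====

-- B replaces A's enumerate loop and two accumulator lists with two extended slices
-- (odd-index chars in order + even-index chars reversed): more idiomatic, same cost.


-- ===== PORT A =====
-- for i, char in enumerate(sentence): if i % 2 == 1: even_chars.append(char) else: odd_chars.append(char)
-- return ''.join(even_chars) + ''.join(reversed(odd_chars))
def encrypt_sentence (sentence : String) : String :=
  let p := (PySem.List.enumerate sentence.toList 0).foldl
    (fun (acc : List Char × List Char) ic =>
      if PySem.Int.mod ic.1 2 = 1 then (acc.1 ++ [ic.2], acc.2) else (acc.1, acc.2 ++ [ic.2]))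
    ([], [])
  String.ofList p.1 ++ String.ofList p.2.reverse

-- ===== PORT B =====
-- return sentence[1::2] + sentence[0::2][::-1]
-- (the .getD "" only totalizes the Option: a slice with step 2 / -1 never raises in Python)
def encrypt_sentence_alt (sentence : String) : String :=
  (PySem.Str.slice? sentence (some 1) none 2).getD "" ++
    (PySem.Str.slice? ((PySem.Str.slice? sentence (some 0) none 2).getD "") none none (-1)).getD ""

-- ===== PRECONDITION & SPEC =====
def Spec_encrypt_sentence (sentence : String) (out : String) : Prop := out = encrypt_sentence_alt sentence
instance (sentence : String) (out : String) : Decidable (Spec_encrypt_sentence sentence out) := by unfold Spec_encrypt_sentence; infer_instance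

-- ===== CLAIM (what is proved, stated in full; the proofs are below) =====
def Claim_equal_encrypt_sentence : Prop := ∀ (sentence : String), Dom_encrypt_sentence sentence → Spec_encrypt_sentence sentence (encrypt_sentence sentence)

-- ===== LEMMAS AND PROOFS =====

/-- Split a list into (chars at even positions, chars at odd positions). -/
def pvSplit2 {α : Type} : List α → List α × List α
  | [] => ([], [])
  | x :: xs => ((pvSplit2 xs).2.cons x, (pvSplit2 xs).1)

theorem pvSplit2_snd {α : Type} (l : List α) : (pvSplit2 l).2 = (pvSplit2 l.tail).1 := by
  cases l <;> simp [pvSplit2]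

theorem pvFilterMap_range_even {α : Type} :
    ∀ (c : Nat) (l : List α), l.length ≤ 2 * c →
      (List.range c).filterMap (fun k => l[2 * k]?) = (pvSplit2 l).1 := by
  intro c
  induction c with
  | zero =>
    intro l h
    have : l = [] := by cases l <;> simp_all
    subst this; simp [pvSplit2]
  | succ c ih =>
    intro l h
    rw [List.range_succ_eq_map, List.filterMap_cons, List.filterMap_map]
    have hrw : ((fun k => l[2 * k]?) ∘ (fun k => k + 1)) = (fun k => (l.drop 2)[2 * k]?) := by
      funext k
      simp [List.getElem?_drop]
      congr 1
      omega
    rw [hrw]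
    match l with
    | [] => simp [pvSplit2]
    | [x] =>
      simp only [List.drop_succ_cons, List.drop_nil]
      rw [ih [] (by simp)]
      simp [pvSplit2]
    | x :: y :: xs =>
      simp only [List.length_cons] at h
      simp only [List.drop_succ_cons, List.drop_zero]
      rw [ih xs (by omega)]
      simp [pvSplit2]

theorem pvSlice0 {α : Type} (l : List α) :
    PySem.List.slice? l (some 0) none 2 = some (pvSplit2 l).1 := by
  simp only [PySem.List.slice?, PySem.List.sliceIndices]
  norm_num
  rcases Nat.eq_zero_or_pos l.length with h0 | hpos
  · have : l = [] := List.length_eq_zero_iff.mp h0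
    subst this; simp [pvSplit2]
  · rw [if_pos hpos]
    rw [← pvFilterMap_range_even (((l.length : Int) + 2 - 1) / 2).toNat l (by omega)]
    apply List.filterMap_congr
    intro k _
    have hk : (2 * (k : Int)).toNat = 2 * k := by omega
    rw [hk]

theorem pvSlice1 {α : Type} (l : List α) :
    PySem.List.slice? l (some 1) none 2 = some (pvSplit2 l).2 := by
  simp only [PySem.List.slice?, PySem.List.sliceIndices]
  norm_num
  rcases Nat.eq_zero_or_pos l.length with h0 | hpos
  · have : l = [] := List.length_eq_zero_iff.mp h0
    subst this; simp [pvSplit2]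
  · have hmin : min (1 : Int) (l.length : Int) = 1 := by omega
    rw [hmin]
    rw [pvSplit2_snd]
    by_cases h1 : 1 < l.length
    · rw [if_pos h1]
      rw [← pvFilterMap_range_even (((l.length : Int) - 1 + 2 - 1) / 2).toNat l.tail
            (by simp [List.length_tail]; omega)]
      apply List.filterMap_congr
      intro k _
      rw [← List.drop_one, List.getElem?_drop]
      have hk : (1 + 2 * (k : Int)).toNat = 1 + 2 * k := by omega
      rw [hk]
    · rw [if_neg h1]
      have h2 : l.length = 1 := by omega
      obtain ⟨x, hx⟩ := List.length_eq_one_iff.mp h2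
      subst hx
      simp [pvSplit2]

/-- A's fold over `enumerate` computes the parity split (with accumulators appended). -/
theorem pvFold_enum (l : List Char) :
    ∀ (i : Int) (e o : List Char), 0 ≤ i →
      (PySem.List.enumerate l i).foldl
        (fun (acc : List Char × List Char) ic =>
          if PySem.Int.mod ic.1 2 = 1 then (acc.1 ++ [ic.2], acc.2) else (acc.1, acc.2 ++ [ic.2]))
        (e, o) =
      if PySem.Int.mod i 2 = 1 then (e ++ (pvSplit2 l).1, o ++ (pvSplit2 l).2)
      else (e ++ (pvSplit2 l).2, o ++ (pvSplit2 l).1) := by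
  induction l with
  | nil =>
    intro i e o _
    simp only [PySem.List.enumerate, List.foldl_nil, pvSplit2]
    split <;> simp
  | cons x xs ih =>
    intro i e o hi
    rw [PySem.List.enumerate_cons, List.foldl_cons]
    have hmod : PySem.Int.mod i 2 = i % 2 := by
      simp [PySem.Int.mod, Int.fmod_eq_emod_of_nonneg _ (by norm_num : (0:Int) ≤ 2)]
    have hmod' : PySem.Int.mod (i + 1) 2 = (i + 1) % 2 := by
      simp [PySem.Int.mod, Int.fmod_eq_emod_of_nonneg _ (by norm_num : (0:Int) ≤ 2)]
    by_cases hp : i % 2 = 1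
    · rw [hmod, if_pos hp]
      simp only [hp]
      rw [ih (i + 1) (e ++ [x]) o (by omega)]
      rw [hmod', if_neg (by omega)]
      simp [pvSplit2]
    · rw [hmod, if_neg hp]
      simp only [hp]
      rw [ih (i + 1) e (o ++ [x]) (by omega)]
      rw [hmod', if_pos (by omega)]
      simp [pvSplit2]

theorem pvOfList_append (a b : List Char) :
    String.ofList a ++ String.ofList b = String.ofList (a ++ b) := by
  apply String.toList_injective
  simp

-- ===== VERDICT (by name: the statement is the Claim_ definition above) =====
theorem encrypt_sentence_spec : Claim_equal_encrypt_sentence := by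
  intro s _
  unfold Spec_encrypt_sentence encrypt_sentence encrypt_sentence_alt
  rw [pvFold_enum s.toList 0 [] [] le_rfl]
  simp only [PySem.Int.mod, Int.fmod]
  norm_num
  simp only [PySem.Str.slice?, PySem.Chars.slice?_eq_listSlice?, pvSlice0, pvSlice1]
  simp only [Option.map_some, Option.getD_some]
  rw [show ((String.ofList (pvSplit2 s.toList).1).toList) = (pvSplit2 s.toList).1 by simp]
  rw [PySem.List.slice?_none_none_neg_one]
  simp only [Option.map_some, Option.getD_some, pvOfList_append]
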